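-- pv_equiv track=rewrite | github.com/FredC94/MOOC-Python3 | UpyLab/UpyLaB 5.02 - Manip tuples - ADN.py | est_adn
-- ===== SOURCE A (Python) =====
-- def est_adn(adn):
--     liste = ["A", "C", "G", "T"]
--     liste_adn = list(adn)  # je split l'argument pour pouvoir boucler sur chacun des termes et/
--     # et vérifier si il est présent dans la liste
--     if len(liste_adn) == 0:
--         return False
--     for c in liste_adn:
--         if c not in liste:
--             return False
--     return True
-- ===== SOURCE B (Python) =====
-- def est_adn(adn):
--     t = list(adn)
--     n = len(t)
--     return n > 0 and t.count("A") + t.count("C") + t.count("G") + t.count("T") == n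
-- ===== Notes on version B (the rewrite author's own statement) =====
-- stated objective: alternative
-- what changed: Replaces the early-exit per-character membership loop with a counting algorithm: count the occurrences of each of the four nucleotides and return True iff the input is non-empty and the four counts sum to the length.
import Mathlib
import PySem

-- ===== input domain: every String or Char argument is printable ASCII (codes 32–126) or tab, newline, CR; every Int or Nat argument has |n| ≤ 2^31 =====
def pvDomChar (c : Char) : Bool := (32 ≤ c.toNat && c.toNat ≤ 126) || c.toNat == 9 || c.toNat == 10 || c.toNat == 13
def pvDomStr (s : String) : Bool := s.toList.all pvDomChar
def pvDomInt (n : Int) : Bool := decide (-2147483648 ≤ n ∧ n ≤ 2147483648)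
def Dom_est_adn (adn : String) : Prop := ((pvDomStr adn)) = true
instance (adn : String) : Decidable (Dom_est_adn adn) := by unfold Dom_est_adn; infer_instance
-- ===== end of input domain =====

-- B replaces the early-exit membership loop by counting the four nucleotides and comparing the total with the length (alternative; same cost).
-- ===== PORT A =====
-- the early-exit loop 'for c in liste_adn: if c not in liste: return False; return True'
def est_adn_loop (liste : List Char) : List Char → Bool
  | [] => true
  | c :: rest => if !(liste.contains c) then false else est_adn_loop liste rest

def est_adn (adn : String) : Bool :=
  let liste : List Char := ['A', 'C', 'G', 'T']
  let liste_adn := adn.toList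
  if liste_adn.length = 0 then false
  else est_adn_loop liste liste_adn

-- ===== PORT B =====
def est_adn_alt (adn : String) : Bool :=
  let t := adn.toList
  let n := t.length
  decide (0 < n) &&
    decide (PySem.List.count t 'A' + PySem.List.count t 'C' +
            PySem.List.count t 'G' + PySem.List.count t 'T' = n)

-- ===== PRECONDITION & SPEC =====
def Spec_est_adn (adn : String) (out : Bool) : Prop := out = est_adn_alt adn
instance (adn : String) (out : Bool) : Decidable (Spec_est_adn adn out) := by unfold Spec_est_adn; infer_instance

-- ===== CLAIM (what is proved, stated in full; the proofs are below) =====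
def Claim_equal_est_adn : Prop := ∀ (adn : String), Dom_est_adn adn → Spec_est_adn adn (est_adn adn)

-- ===== LEMMAS AND PROOFS =====
-- the early-exit loop decides 'every char is in the alphabet'
theorem est_adn_loop_eq_all (liste : List Char) (l : List Char) :
    est_adn_loop liste l = l.all (fun c => liste.contains c) := by
  induction l with
  | nil => rfl
  | cons c rest ih =>
    by_cases h : liste.contains c = true <;> simp [est_adn_loop, ih]

-- the four nucleotide counts sum to the count of 'in the alphabet'
theorem sum_counts_eq_countP (l : List Char) :
    l.count 'A' + l.count 'C' + l.count 'G' + l.count 'T' =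
      l.countP (fun c => c == 'A' || c == 'C' || c == 'G' || c == 'T') := by
  induction l with
  | nil => rfl
  | cons h t ih =>
    simp only [List.count_cons, List.countP_cons, ← ih]
    by_cases hA : h = 'A' <;> by_cases hC : h = 'C' <;> by_cases hG : h = 'G' <;>
      by_cases hT : h = 'T' <;> simp_all <;> omega

-- ===== VERDICT (by name: the statement is the Claim_ definition above) =====
theorem est_adn_spec : Claim_equal_est_adn := by
  intro adn _
  unfold Spec_est_adn est_adn est_adn_alt
  simp only [est_adn_loop_eq_all, PySem.List.count_eq, sum_counts_eq_countP]
  rcases hl : adn.toList with _ | ⟨c, rest⟩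
  · simp
  · simp only [List.length_cons]
    rw [if_neg (by omega)]
    have hiff := List.countP_eq_length
      (p := fun c => c == 'A' || c == 'C' || c == 'G' || c == 'T') (l := c :: rest)
    simp only [List.length_cons] at hiff
    rw [Bool.eq_iff_iff, Bool.and_eq_true, List.all_eq_true]
    rw [decide_eq_true_iff, decide_eq_true_iff, hiff]
    constructor
    · intro h
      exact ⟨by omega, fun x hx => by have := h x hx; simp at this ⊢; tauto⟩
    · intro h x hx
      have := h.2 x hx; simp at this ⊢; tauto
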